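-- pv_equiv track=rewrite | github.com/KindOfBlueTeam/mac-monkey | mm_chaos.py | worst_status
-- ===== SOURCE A (Python) =====
-- from typing import Any, Dict, List, Optional, Tuple
--
-- def worst_status(sections: List[Dict[str, Any]]) -> str:
--     order = {"OK": 0, "WARN": 1, "BAD": 2}
--     worst = "OK"
--     for sec in sections:
--         for chk in sec.get("checks", []) or []:
--             s = (chk.get("status") or "OK")
--             if order.get(s, 0) > order[worst]:
--                 worst = s
--     return worst
-- ===== SOURCE B (Python) =====
-- def worst_status(sections):
--     statuses = [(chk.get("status") or "OK")
--                 for sec in sections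
--                 for chk in (sec.get("checks", []) or [])]
--     if "BAD" in statuses:
--         return "BAD"
--     if "WARN" in statuses:
--         return "WARN"
--     return "OK"
-- ===== Notes on version B (the rewrite author's own statement) =====
-- stated objective: idiomatic
-- what changed: Replaces the incremental numeric-rank max tracking with a collect-then-query strategy: flatten all normalized statuses into one list and answer by tiered membership tests (BAD, then WARN, else OK).
import Mathlib
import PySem

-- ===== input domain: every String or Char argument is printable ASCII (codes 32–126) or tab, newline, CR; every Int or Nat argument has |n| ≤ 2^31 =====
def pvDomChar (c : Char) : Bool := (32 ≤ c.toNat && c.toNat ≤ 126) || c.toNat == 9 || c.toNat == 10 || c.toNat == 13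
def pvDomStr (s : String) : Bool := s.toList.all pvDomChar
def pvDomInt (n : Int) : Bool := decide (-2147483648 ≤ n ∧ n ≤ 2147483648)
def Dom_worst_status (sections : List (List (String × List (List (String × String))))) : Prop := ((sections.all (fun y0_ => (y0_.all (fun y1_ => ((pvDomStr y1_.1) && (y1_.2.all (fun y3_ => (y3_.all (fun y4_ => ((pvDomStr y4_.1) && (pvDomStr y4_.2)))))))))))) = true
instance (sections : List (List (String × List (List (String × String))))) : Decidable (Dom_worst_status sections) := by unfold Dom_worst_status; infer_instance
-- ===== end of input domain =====

-- B replaces A's incremental numeric-rank max tracking with one flat list of normalized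
-- statuses queried by tiered membership tests; same cost, more idiomatic.

-- ===== PORT A =====
-- order = {"OK": 0, "WARN": 1, "BAD": 2}
def pvOrder : PySem.Dict String Int := PySem.Dict.ofList [("OK", 0), ("WARN", 1), ("BAD", 2)]

def worst_status (sections : List (List (String × List (List (String × String))))) : String :=
  sections.foldl (fun worst sec =>
    -- sec.get("checks", []) or []   ('or []' is the identity on lists here: [] or [] is [])
    ((PySem.Dict.mk sec).getD "checks" []).foldl (fun worst chk =>
      -- s = (chk.get("status") or "OK")
      let s : String := match (PySem.Dict.mk chk).get? "status" with
        | some v => if v = "" then "OK" else v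
        | none => "OK"
      -- order[worst]: worst is always one of the three keys, so getD 0 is exact here
      if (pvOrder.get? s).getD 0 > (pvOrder.get? worst).getD 0 then s else worst) worst) "OK"

-- ===== PORT B =====
def worst_status_alt (sections : List (List (String × List (List (String × String))))) : String :=
  let statuses : List String := sections.flatMap (fun sec =>
    ((PySem.Dict.mk sec).getD "checks" []).map (fun chk =>
      match (PySem.Dict.mk chk).get? "status" with
      | some v => if v = "" then "OK" else v
      | none => "OK"))
  if statuses.contains "BAD" then "BAD"
  else if statuses.contains "WARN" then "WARN"
  else "OK"

-- ===== PRECONDITION & SPEC =====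
def Spec_worst_status (sections : List (List (String × List (List (String × String))))) (out : String) : Prop := out = worst_status_alt sections
instance (sections : List (List (String × List (List (String × String))))) (out : String) : Decidable (Spec_worst_status sections out) := by unfold Spec_worst_status; infer_instance

-- ===== CLAIM (what is proved, stated in full; the proofs are below) =====
def Claim_equal_worst_status : Prop := ∀ (sections : List (List (String × List (List (String × String))))), Dom_worst_status sections → Spec_worst_status sections (worst_status sections)

-- ===== LEMMAS AND PROOFS =====

-- A's inner-loop step, as a function of the already-normalized status
def pvStep (w s : String) : String :=
  if (pvOrder.get? s).getD 0 > (pvOrder.get? w).getD 0 then s else w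

-- the normalization applied to one check dict
def pvNorm (chk : List (String × String)) : String :=
  match (PySem.Dict.mk chk).get? "status" with
  | some v => if v = "" then "OK" else v
  | none => "OK"

theorem pvRank_eq (s : String) :
    (pvOrder.get? s).getD 0 =
      if s = "WARN" then 1 else if s = "BAD" then 2 else 0 := by
  have h : pvOrder = PySem.Dict.mk [("OK", 0), ("WARN", 1), ("BAD", 2)] := by decide
  rw [h]
  by_cases h0 : s = "OK" <;> by_cases h1 : s = "WARN" <;> by_cases h2 : s = "BAD" <;>
    simp_all [beq_iff_eq, Ne.symm, PySem.Dict.get?]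

def pvGood (w : String) : Prop := w = "OK" ∨ w = "WARN" ∨ w = "BAD"

theorem pvStep_good (w s : String) (hw : pvGood w) : pvGood (pvStep w s) := by
  unfold pvStep
  rw [pvRank_eq, pvRank_eq]
  by_cases h1 : s = "WARN" <;> by_cases h2 : s = "BAD" <;>
    rcases hw with h | h | h <;> subst h <;> simp_all [pvGood]

theorem pvFoldl_step (L : List String) (w : String) (hw : pvGood w) :
    L.foldl pvStep w =
      if "BAD" ∈ L ∨ w = "BAD" then "BAD"
      else if "WARN" ∈ L ∨ w = "WARN" then "WARN"
      else w := by
  induction L generalizing w with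
  | nil => simp; rcases hw with h | h | h <;> subst h <;> simp
  | cons s L ih =>
    rw [List.foldl_cons, ih _ (pvStep_good w s hw)]
    unfold pvStep
    rw [pvRank_eq, pvRank_eq]
    by_cases h1 : s = "WARN" <;> by_cases h2 : s = "BAD" <;>
      rcases hw with h | h | h <;> subst h <;> simp_all <;> split_ifs <;> simp_all

theorem pvFoldl_flat (f : List (String × List (List (String × String))) → List String)
    (sections : List (List (String × List (List (String × String))))) (w : String) :
    sections.foldl (fun w sec => (f sec).foldl pvStep w) w =
      (sections.flatMap f).foldl pvStep w := by
  induction sections generalizing w with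
  | nil => rfl
  | cons sec rest ih => simp [List.foldl_append, ih]

-- ===== VERDICT (by name: the statement is the Claim_ definition above) =====
theorem worst_status_spec : Claim_equal_worst_status := by
  intro sections _
  show worst_status sections = worst_status_alt sections
  unfold worst_status worst_status_alt
  have hinner : ∀ (sec : List (String × List (List (String × String)))) (w : String),
      ((PySem.Dict.mk sec).getD "checks" []).foldl (fun worst chk =>
        let s : String := match (PySem.Dict.mk chk).get? "status" with
          | some v => if v = "" then "OK" else v
          | none => "OK"
        if (pvOrder.get? s).getD 0 > (pvOrder.get? worst).getD 0 then s else worst) w =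
      (((PySem.Dict.mk sec).getD "checks" []).map pvNorm).foldl pvStep w := by
    intro sec w
    rw [List.foldl_map]
    rfl
  calc sections.foldl (fun worst sec =>
        ((PySem.Dict.mk sec).getD "checks" []).foldl (fun worst chk =>
          let s : String := match (PySem.Dict.mk chk).get? "status" with
            | some v => if v = "" then "OK" else v
            | none => "OK"
          if (pvOrder.get? s).getD 0 > (pvOrder.get? worst).getD 0 then s else worst) worst) "OK"
      = sections.foldl (fun w sec => (((PySem.Dict.mk sec).getD "checks" []).map pvNorm).foldl pvStep w) "OK" := by
        simp only [hinner]
    _ = (sections.flatMap (fun sec => ((PySem.Dict.mk sec).getD "checks" []).map pvNorm)).foldl pvStep "OK" :=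
        pvFoldl_flat _ sections "OK"
    _ = _ := by
        rw [pvFoldl_step _ "OK" (Or.inl rfl)]
        simp [pvNorm]
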